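-- pv_equiv track=rewrite | github.com/joshazze/app-salas | visualizar_planilha.py | horario_para_slot
-- ===== SOURCE A (Python) =====
-- SLOTS = {
--     "manha1": {"label": "Manha 1",  "inicio": (6,  0), "fim": (9, 29)},
--     "manha2": {"label": "Manha 2",  "inicio": (9, 30), "fim": (12, 59)},
--     "tarde1": {"label": "Tarde 1",  "inicio": (13, 0), "fim": (13, 59)},
--     "tarde2": {"label": "Tarde 2",  "inicio": (14, 0), "fim": (17, 59)},
--     "noite1": {"label": "Noite 1",  "inicio": (18, 0), "fim": (18, 59)},
--     "noite2": {"label": "Noite 2",  "inicio": (19, 0), "fim": (23, 59)},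
-- }
--
-- def horario_para_slot(horario_str):
--     """Dado '07:30/09:20', retorna a chave do slot correspondente ao horario de inicio."""
--     if not horario_str or not isinstance(horario_str, str):
--         return None
--     try:
--         inicio = horario_str.split("/")[0].strip()
--         h, m = map(int, inicio.split(":"))
--         total = h * 60 + m
--         for slot_key, slot in SLOTS.items():
--             ini_min = slot["inicio"][0] * 60 + slot["inicio"][1]
--             fim_min = slot["fim"][0] * 60 + slot["fim"][1]
--             if ini_min <= total <= fim_min:
--                 return slot_key
--     except (ValueError, IndexError):
--         pass
--     return None
-- ===== SOURCE B (Python) =====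
-- _STARTS = (360, 570, 780, 840, 1080, 1140)
-- _KEYS = ("manha1", "manha2", "tarde1", "tarde2", "noite1", "noite2")
-- _END = 1439  # 23:59, end of the last slot
--
--
-- def horario_para_slot(horario_str):
--     """Dado '07:30/09:20', retorna a chave do slot correspondente ao horario de inicio."""
--     if not horario_str or not isinstance(horario_str, str):
--         return None
--     try:
--         inicio = horario_str.split("/")[0].strip()
--         h, m = map(int, inicio.split(":"))
--     except (ValueError, IndexError):
--         return None
--     total = h * 60 + m
--     if total < _STARTS[0] or total > _END:
--         return None
--     # bisect_right over the contiguous slot start minutes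
--     lo, hi = 0, len(_STARTS)
--     while lo < hi:
--         mid = (lo + hi) // 2
--         if _STARTS[mid] <= total:
--             lo = mid + 1
--         else:
--             hi = mid
--     return _KEYS[lo - 1]
-- ===== Notes on version B (the rewrite author's own statement) =====
-- stated objective: alternative
-- what changed: Identical parsing/guards, but the per-slot linear scan over SLOTS is replaced by an early range guard plus a hand-rolled bisect_right binary search over a precomputed table of contiguous slot start-minutes.
import Mathlib
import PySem

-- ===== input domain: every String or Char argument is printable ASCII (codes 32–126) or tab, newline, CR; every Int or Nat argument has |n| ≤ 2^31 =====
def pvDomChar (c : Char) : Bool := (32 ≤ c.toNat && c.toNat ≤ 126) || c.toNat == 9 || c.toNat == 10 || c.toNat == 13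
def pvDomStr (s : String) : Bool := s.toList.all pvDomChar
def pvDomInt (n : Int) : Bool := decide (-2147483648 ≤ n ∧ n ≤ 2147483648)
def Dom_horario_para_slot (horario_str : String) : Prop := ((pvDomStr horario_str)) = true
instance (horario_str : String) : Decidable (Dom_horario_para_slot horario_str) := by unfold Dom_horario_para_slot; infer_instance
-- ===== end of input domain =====

-- B replaces A's per-slot linear range scan by a binary search over the contiguous
-- slot start-minutes (objective: alternative decomposition; same parsing and guards).

-- ===== PORT A =====
-- SLOTS as (key, inicio, fim); labels are never read by the function.
def slotsA : List (String × (Int × Int) × (Int × Int)) :=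
  [("manha1", (6, 0), (9, 29)), ("manha2", (9, 30), (12, 59)),
   ("tarde1", (13, 0), (13, 59)), ("tarde2", (14, 0), (17, 59)),
   ("noite1", (18, 0), (18, 59)), ("noite2", (19, 0), (23, 59))]

-- the for-loop over SLOTS.items(): first slot whose range contains total
def findSlotA (total : Int) : List (String × (Int × Int) × (Int × Int)) → Option String
  | [] => none
  | (k, ini, fim) :: rest =>
    let iniMin := ini.1 * 60 + ini.2
    let fimMin := fim.1 * 60 + fim.2
    if iniMin ≤ total ∧ total ≤ fimMin then some k else findSlotA total rest

-- the try-body after 'inicio' is parsed to h, m: ValueError (wrong arity or non-int part) → None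
def afterParseA : List (Option Int) → Option String
  | [some h, some m] => findSlotA (h * 60 + m) slotsA
  | _ => none

def horario_para_slot (horario_str : String) : Option String :=
  if horario_str = "" then none          -- 'not horario_str'; isinstance is always true for a String
  else
    match PySem.List.pyGet? ((PySem.Str.split? horario_str "/").getD []) 0 with
    | none => none                        -- IndexError caught → None (unreachable: split is nonempty)
    | some first =>
      -- inicio = first.strip(); 'h, m = map(int, inicio.split(":"))'
      afterParseA (((PySem.Str.split? (PySem.Str.strip first) ":").getD []).map PySem.Int.ofStr?)

-- ===== PORT B =====
def bStarts : List Int := [360, 570, 780, 840, 1080, 1140]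
def bKeys : List String := ["manha1", "manha2", "tarde1", "tarde2", "noite1", "noite2"]

-- the while-loop (bisect_right); _STARTS[mid] is always in range, ported with getD
def bsearchB (total : Int) (lo hi : Nat) : Nat :=
  if lo < hi then
    let mid := (lo + hi) / 2
    if bStarts.getD mid 0 ≤ total then bsearchB total (mid + 1) hi
    else bsearchB total lo mid
  else lo
termination_by hi - lo
decreasing_by all_goals omega

-- total = h*60 + m, the early-out guard, then _KEYS[lo-1] from the bisect loop
def afterParseB : List (Option Int) → Option String
  | [some h, some m] =>
    if h * 60 + m < bStarts.getD 0 0 ∨ h * 60 + m > 1439 then none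
    else some (bKeys.getD (bsearchB (h * 60 + m) 0 6 - 1) "")   -- _KEYS[lo-1], lo ≥ 1 here
  | _ => none

def horario_para_slot_alt (horario_str : String) : Option String :=
  if horario_str = "" then none
  else
    match PySem.List.pyGet? ((PySem.Str.split? horario_str "/").getD []) 0 with
    | none => none
    | some first =>
      afterParseB (((PySem.Str.split? (PySem.Str.strip first) ":").getD []).map PySem.Int.ofStr?)

-- ===== PRECONDITION & SPEC =====
def Spec_horario_para_slot (horario_str : String) (out : Option String) : Prop := out = horario_para_slot_alt horario_str
instance (horario_str : String) (out : Option String) : Decidable (Spec_horario_para_slot horario_str out) := by unfold Spec_horario_para_slot; infer_instance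

-- ===== CLAIM (what is proved, stated in full; the proofs are below) =====
def Claim_equal_horario_para_slot : Prop := ∀ (horario_str : String), Dom_horario_para_slot horario_str → Spec_horario_para_slot horario_str (horario_para_slot horario_str)

-- ===== LEMMAS AND PROOFS =====
theorem bsearch_eval (t : Int) :
    bsearchB t 0 6 =
      (if 840 ≤ t then (if 1140 ≤ t then 6 else if 1080 ≤ t then 5 else 4)
       else if 570 ≤ t then (if 780 ≤ t then 3 else 2)
       else if 360 ≤ t then 1 else 0) := by
  simp [bsearchB, bStarts]

theorem pick_eq (total : Int) :
    findSlotA total slotsA =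
      (if total < bStarts.getD 0 0 ∨ total > 1439 then none
       else some (bKeys.getD (bsearchB total 0 6 - 1) "")) := by
  rw [bsearch_eval]
  simp [findSlotA, slotsA, bStarts, bKeys]
  split_ifs <;> first | rfl | omega

theorem step_eq (L : List (Option Int)) : afterParseA L = afterParseB L := by
  rcases L with _ | ⟨_ | h, _ | ⟨_ | m, _ | t⟩⟩ <;> first | rfl | exact pick_eq _

theorem ports_eq (s : String) : horario_para_slot s = horario_para_slot_alt s := by
  rw [horario_para_slot, horario_para_slot_alt]
  split_ifs
  · rfl
  cases PySem.List.pyGet? ((PySem.Str.split? s "/").getD []) 0 with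
  | none => rfl
  | some first => exact step_eq _

-- ===== VERDICT (by name: the statement is the Claim_ definition above) =====
theorem horario_para_slot_spec : Claim_equal_horario_para_slot := by
  intro s _
  unfold Spec_horario_para_slot
  exact ports_eq s
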